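-- pv_equiv track=rewrite | github.com/amarjeet4296/-30DaysPetProjectsinPy | string/change_char.py | solve
-- ===== SOURCE A (Python) =====
-- def solve(A, B):
--     char_count = {}
--
--     for char in A:
--         if char not in char_count:
--             char_count[char] = 0
--
--         char_count[char] += 1
--
--     counts = sorted(char_count.values())
--
--     # Current number of distinct characters
--     answer = len(counts)
--
--     # Excluding the last element because there has to be atleast 1 character
--     for i in range(len(counts) - 1):
--         # We can substitute all the characters
--         # Assume you are substituting for the max occurred character
--         if counts[i] <= B:
--             B -= counts[i]
--             answer -= 1
--
--         # If we can't substitute all counts[i]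
--         # We definitely can't substitute for any upcoming values
--         else:
--             break
--
--     return answer
-- ===== SOURCE B (Python) =====
-- def solve(A, B):
--     freq = {}
--     for ch in A:
--         freq[ch] = freq.get(ch, 0) + 1
--     vals = sorted(freq.values())
--     prefix = []
--     run = 0
--     for v in vals[:-1]:
--         run += v
--         prefix.append(run)
--     return len(vals) - sum(1 for p in prefix if p <= B)
-- ===== Notes on version B (the rewrite author's own statement) =====
-- stated objective: simpler
-- what changed: Replaces A's stateful decrement-the-budget loop with break (and the two-step dict init) by a get-based counter, a prefix-sum list over the sorted counts, and a single count of how many prefix sums fit within the budget.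
import Mathlib
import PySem

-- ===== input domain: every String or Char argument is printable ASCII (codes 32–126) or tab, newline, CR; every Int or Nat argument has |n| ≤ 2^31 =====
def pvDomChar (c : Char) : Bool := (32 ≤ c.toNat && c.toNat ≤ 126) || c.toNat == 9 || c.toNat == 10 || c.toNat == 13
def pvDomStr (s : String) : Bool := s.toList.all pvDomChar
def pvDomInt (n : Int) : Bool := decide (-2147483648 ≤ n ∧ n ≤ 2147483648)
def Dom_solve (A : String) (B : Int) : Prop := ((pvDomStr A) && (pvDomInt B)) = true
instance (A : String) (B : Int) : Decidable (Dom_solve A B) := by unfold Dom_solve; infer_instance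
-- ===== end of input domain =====

-- B replaces A's budget-decrementing loop with a break by a prefix-sum list over the
-- sorted counts and a count of the prefixes that fit in the budget (objective: simpler).

-- ===== PORT A =====
-- the 'for i in range(len(counts)-1)' loop with break: sequential access counts[0..len-2],
-- i.e. structural recursion over counts.dropLast (exact: indices are always in range)
def solveLoopA : List Int → Int → Int → Int
  | [], _, ans => ans
  | c :: rest, b, ans => if c ≤ b then solveLoopA rest (b - c) (ans - 1) else ans

def solve (A : String) (B : Int) : Int :=
  let charCount : PySem.Dict Char Int :=
    A.toList.foldl (fun d ch =>
      let d := if ¬ d.contains ch then d.insert ch 0 else d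
      d.modify ch 0 (· + 1)) PySem.Dict.empty
  let counts := PySem.List.sorted charCount.values (fun x => x) false
  solveLoopA counts.dropLast B (counts.length : Int)

-- ===== PORT B =====
def solve_alt (A : String) (B : Int) : Int :=
  let freq : PySem.Dict Char Int :=
    A.toList.foldl (fun d ch => d.insert ch (d.getD ch 0 + 1)) PySem.Dict.empty
  let vals := PySem.List.sorted freq.values (fun x => x) false
  -- vals[:-1] is vals.dropLast (exact); the loop appends the running sum each step
  let pr := vals.dropLast.foldl
    (fun (st : Int × List Int) v => (st.1 + v, st.2 ++ [st.1 + v])) (0, [])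
  (vals.length : Int) - (pr.2.countP (fun p => decide (p ≤ B)) : Int)

-- ===== PRECONDITION & SPEC =====
def Spec_solve (A : String) (B : Int) (out : Int) : Prop := out = solve_alt A B
instance (A : String) (B : Int) (out : Int) : Decidable (Spec_solve A B out) := by unfold Spec_solve; infer_instance

-- ===== CLAIM (what is proved, stated in full; the proofs are below) =====
def Claim_equal_solve : Prop := ∀ (A : String) (B : Int), Dom_solve A B → Spec_solve A B (solve A B)

-- ===== LEMMAS AND PROOFS =====

-- Both per-character dict updates equal a plain `modify _ 0 (·+1)` step.
theorem stepB_eq_modify {κ : Type} [BEq κ] (d : PySem.Dict κ Int) (ch : κ) :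
    d.insert ch (d.getD ch 0 + 1) = d.modify ch 0 (· + 1) := rfl

theorem stepA_eq_modify {κ : Type} [BEq κ] [LawfulBEq κ] (d : PySem.Dict κ Int) (ch : κ) :
    (if ¬ d.contains ch then d.insert ch 0 else d).modify ch 0 (· + 1)
      = d.modify ch 0 (· + 1) := by
  by_cases h : d.contains ch
  · simp [h]
  · have hanyF : (d.items.any fun p => p.1 == ch) = false := by
      simp only [PySem.Dict.contains] at h; exact Bool.eq_false_iff.mpr h
    have hfind : d.items.find? (fun p => p.1 == ch) = none := by
      rw [List.find?_eq_none]
      intro p hp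
      simpa using List.any_eq_false.mp hanyF p hp
    have hnomatch : ∀ p ∈ d.items, (fun p : κ × Int => if (p.1 == ch) = true then (ch, (1:Int)) else p) p = p := by
      intro p hp
      simp [List.any_eq_false.mp hanyF p hp]
    apply PySem.Dict.ext
    simp [PySem.Dict.modify, PySem.Dict.getD, PySem.Dict.get?, PySem.Dict.insert,
      PySem.Dict.contains, hanyF, hfind, List.find?_append, List.map_congr_left hnomatch]

-- the prefix-list the foldl in B builds, written recursively for the proofs
def prefList (run : Int) : List Int → List Int
  | [] => []
  | v :: r => (run + v) :: prefList (run + v) r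

theorem foldl_prefix_eq (l : List Int) : ∀ (run : Int) (acc : List Int),
    l.foldl (fun (st : Int × List Int) v => (st.1 + v, st.2 ++ [st.1 + v])) (run, acc)
      = (run + l.sum, acc ++ prefList run l) := by
  induction l with
  | nil => intro run acc; simp [prefList]
  | cons v r ih =>
      intro run acc
      simp only [List.foldl_cons, prefList, ih, List.sum_cons, Prod.mk.injEq]
      exact ⟨by ring, by simp⟩

theorem prefList_ge (l : List Int) : ∀ (run : Int), (∀ x ∈ l, 0 ≤ x) →
    ∀ p ∈ prefList run l, run ≤ p := by
  induction l with
  | nil => intro run _ p hp; simp [prefList] at hp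
  | cons v r ih =>
      intro run hnn p hp
      have hv : 0 ≤ v := hnn v (by simp)
      rcases (by simpa [prefList] using hp) with h | h
      · omega
      · have := ih (run + v) (fun x hx => hnn x (by simp [hx])) p h
        omega

theorem loopA_eq_count (l : List Int) : ∀ (b0 run ans : Int), (∀ x ∈ l, 0 ≤ x) →
    solveLoopA l (b0 - run) ans
      = ans - ((prefList run l).countP (fun p => decide (p ≤ b0)) : Int) := by
  induction l with
  | nil => intro b0 run ans _; simp [solveLoopA, prefList]
  | cons c rest ih =>
      intro b0 run ans hnn
      have hrest : ∀ x ∈ rest, 0 ≤ x := fun x hx => hnn x (by simp [hx])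
      by_cases h : c ≤ b0 - run
      · have : b0 - run - c = b0 - (run + c) := by ring
        simp only [solveLoopA, if_pos h, this, ih b0 (run + c) (ans - 1) hrest, prefList,
          List.countP_cons]
        rw [if_pos (by simp; omega)]
        push_cast; ring
      · simp only [solveLoopA, if_neg h]
        have hzero : (prefList run (c :: rest)).countP (fun p => decide (p ≤ b0)) = 0 := by
          rw [List.countP_eq_zero]
          intro p hp
          have := prefList_ge (c :: rest) run hnn p hp
          have hc : 0 ≤ c := hnn c (by simp)
          rcases (by simpa [prefList] using hp) with he | hm
          · simp; omega
          · have := prefList_ge rest (run + c) hrest p hm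
            simp; omega
        simp [hzero]

theorem counter_values_nonneg (cs : List Char) :
    ∀ v ∈ (cs.foldl (fun d ch => d.modify ch 0 (· + 1)) (PySem.Dict.empty : PySem.Dict Char Int)).values,
      0 ≤ v := by
  intro v hv
  set d := cs.foldl (fun d ch => d.modify ch 0 (· + 1)) (PySem.Dict.empty : PySem.Dict Char Int) with hd
  have hnd : d.keys.Nodup := by
    rw [hd]
    exact PySem.Dict.nodup_keys_foldl_modify_key cs (fun x => x) 0 (fun _ _ => (· + 1)) _
      (by simp [PySem.Dict.keys_empty])
  rw [PySem.Dict.values_eq_map_keys d hnd 0] at hv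
  rcases List.mem_map.mp hv with ⟨k, _, hk⟩
  rw [hd] at hk
  rw [PySem.Dict.getD_foldl_modify_add_one cs PySem.Dict.empty k] at hk
  rw [PySem.Dict.getD_empty] at hk
  omega

-- ===== VERDICT (by name: the statement is the Claim_ definition above) =====
theorem solve_spec : Claim_equal_solve := by
  intro A B _
  unfold Spec_solve solve solve_alt
  simp only [stepA_eq_modify, stepB_eq_modify]
  set d := A.toList.foldl (fun d ch => d.modify ch 0 (· + 1)) (PySem.Dict.empty : PySem.Dict Char Int)
  set vals := PySem.List.sorted d.values (fun x => x) false with hvals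
  have hnn : ∀ x ∈ vals.dropLast, 0 ≤ x := by
    intro x hx
    exact counter_values_nonneg A.toList x
      ((PySem.List.mem_sorted d.values (fun x => x) false x).mp (List.mem_of_mem_dropLast hx))
  rw [foldl_prefix_eq]
  have := loopA_eq_count vals.dropLast B 0 (vals.length : Int) hnn
  simp only [sub_zero] at this
  rw [this]
  simp
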